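-- pv_equiv track=rewrite | github.com/christophjonetzko-stack/kranvergleich | scripts/scrape_brand_emails.py | pick_best_email
-- ===== SOURCE A (Python) =====
-- PREFIX_RANK = [
--     "info",
--     "kontakt",
--     "vermietung",
--     "kran",
--     "dispo",
--     "service",
--     "anfrage",
--     "office",
--     "mail",
--     "post",
--     "buero",
--     "zentrale",
--     "contact",
-- ]
--
-- def pick_best_email(emails: list[str], expected_domain: str) -> str | None:
--     """Prefer emails on the expected domain, then generic prefixes, then any."""
--     # Filter by domain
--     domain_matches = [e for e in emails if e.endswith("@" + expected_domain) or e.endswith("." + expected_domain)]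
--     pool = domain_matches if domain_matches else emails
--
--     # Rank by prefix
--     def rank(e: str) -> tuple:
--         prefix = e.split("@", 1)[0]
--         if prefix in PREFIX_RANK:
--             return (PREFIX_RANK.index(prefix), e)
--         return (999, e)
--
--     if not pool:
--         return None
--
--     pool_sorted = sorted(pool, key=rank)
--     return pool_sorted[0]
-- ===== SOURCE B (Python) =====
-- PREFIX_RANK = [
--     "info",
--     "kontakt",
--     "vermietung",
--     "kran",
--     "dispo",
--     "service",
--     "anfrage",
--     "office",
--     "mail",
--     "post",
--     "buero",
--     "zentrale",
--     "contact",
-- ]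
--
-- def pick_best_email(emails: list[str], expected_domain: str) -> str | None:
--     """Prefer emails on the expected domain, then generic prefixes, then any.
--
--     Instead of ranking every email and sorting, walk the priority table itself:
--     the first prefix that has any candidates wins, and the alphabetically
--     smallest candidate in that bucket is returned (matching the (rank, email)
--     sort key of the original); if no prefix matches, the smallest email wins.
--     """
--     pool = [e for e in emails
--             if e.endswith("@" + expected_domain) or e.endswith("." + expected_domain)]
--     if not pool:
--         pool = emails
--     if not pool:
--         return None
--     for p in PREFIX_RANK:
--         bucket = [e for e in pool if e.split("@", 1)[0] == p]
--         if bucket: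
--             return min(bucket)
--     return min(pool)
-- ===== Notes on version B (the rewrite author's own statement) =====
-- stated objective: alternative
-- what changed: B never ranks or sorts the emails: it walks the priority table itself, bucketing the pool by prefix and returning the alphabetically smallest email of the first nonempty bucket (falling back to min of the pool), whereas A computes a (rank, email) key per email and sorts.
import Mathlib
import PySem

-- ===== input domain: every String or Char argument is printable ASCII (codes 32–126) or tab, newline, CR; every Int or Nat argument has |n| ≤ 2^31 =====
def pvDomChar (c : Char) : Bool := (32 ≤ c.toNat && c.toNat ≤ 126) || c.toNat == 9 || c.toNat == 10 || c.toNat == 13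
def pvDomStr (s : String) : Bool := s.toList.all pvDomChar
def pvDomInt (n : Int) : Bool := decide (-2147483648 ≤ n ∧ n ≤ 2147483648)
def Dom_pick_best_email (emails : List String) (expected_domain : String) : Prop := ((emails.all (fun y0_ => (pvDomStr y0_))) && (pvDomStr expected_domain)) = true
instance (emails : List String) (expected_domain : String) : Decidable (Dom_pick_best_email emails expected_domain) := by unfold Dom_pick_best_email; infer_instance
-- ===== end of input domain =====

-- B walks the priority table itself (first prefix with candidates wins, smallest
-- candidate alphabetically) instead of ranking every email and sorting.

-- ===== PORT A =====
def PREFIX_RANK : List String :=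
  ["info", "kontakt", "vermietung", "kran", "dispo", "service", "anfrage",
   "office", "mail", "post", "buero", "zentrale", "contact"]

-- e.split("@", 1)[0]; the separator "@" is nonempty, so splitMax? is always `some`
-- of a nonempty list and the defaults are unreachable.
def pvPrefixOf (e : String) : String :=
  ((PySem.Str.splitMax? e "@" 1).getD [e]).headD e

-- first component of A's rank(e); membership test + list.index as in A
-- (.getD 999 is unreachable: index? succeeds under the contains test)
def pvRankA (e : String) : Int :=
  let pfx := pvPrefixOf e
  if PREFIX_RANK.contains pfx then (((PySem.List.index? PREFIX_RANK pfx).getD 999 : Nat) : Int) else 999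

def pick_best_email (emails : List String) (expected_domain : String) : Option String :=
  let domain_matches := emails.filter (fun e =>
    PySem.Str.endswith e ("@" ++ expected_domain) || PySem.Str.endswith e ("." ++ expected_domain))
  let pool := if domain_matches ≠ [] then domain_matches else emails
  if pool = [] then none
  else PySem.List.pyGet? (PySem.List.sorted2 pool pvRankA (fun e => e) false) 0

-- ===== PORT B =====
-- the 'for p in PREFIX_RANK' loop of Source B: first prefix with a nonempty bucket
-- wins (min(bucket)); after the loop, min(pool)
def pvBucketPick : List String → List String → Option String
  | [], pool => PySem.List.min? pool (fun e => e)
  | p :: rest, pool =>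
      let bucket := pool.filter (fun e => pvPrefixOf e == p)
      if bucket ≠ [] then PySem.List.min? bucket (fun e => e) else pvBucketPick rest pool

def pick_best_email_alt (emails : List String) (expected_domain : String) : Option String :=
  let pool0 := emails.filter (fun e =>
    PySem.Str.endswith e ("@" ++ expected_domain) || PySem.Str.endswith e ("." ++ expected_domain))
  let pool := if pool0 = [] then emails else pool0
  if pool = [] then none
  else pvBucketPick PREFIX_RANK pool

-- ===== PRECONDITION & SPEC =====
def Spec_pick_best_email (emails : List String) (expected_domain : String) (out : Option String) : Prop := out = pick_best_email_alt emails expected_domain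
instance (emails : List String) (expected_domain : String) (out : Option String) : Decidable (Spec_pick_best_email emails expected_domain out) := by unfold Spec_pick_best_email; infer_instance

-- ===== CLAIM (what is proved, stated in full; the proofs are below) =====
def Claim_equal_pick_best_email : Prop := ∀ (emails : List String) (expected_domain : String), Dom_pick_best_email emails expected_domain → Spec_pick_best_email emails expected_domain (pick_best_email emails expected_domain)

-- ===== LEMMAS AND PROOFS =====

-- Python's sort/min key (rank(e), e) as a lexicographic pair
def pvKey (e : String) : Lex (Int × String) := toLex (pvRankA e, e)

theorem pvKey_lt_iff (x m : String) :
    pvKey x < pvKey m ↔ pvRankA x < pvRankA m ∨ (pvRankA x = pvRankA m ∧ x < m) := by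
  unfold pvKey
  exact Prod.Lex.toLex_lt_toLex

theorem pvKey_le_iff (x m : String) :
    pvKey x ≤ pvKey m ↔ pvRankA x < pvRankA m ∨ (pvRankA x = pvRankA m ∧ x ≤ m) := by
  unfold pvKey
  exact Prod.Lex.toLex_le_toLex

-- the boolean test inside min2?'s fold is exactly strict pvKey order
-- (stated over arbitrary Decidable instances so it matches min2?'s compiled body)
theorem pvCond_iff {dI : DecidableLT Int} {dS : DecidableLT String} (x m : String) :
    ((@decide _ (dI (pvRankA x) (pvRankA m)) ||
      !@decide _ (dI (pvRankA m) (pvRankA x)) && @decide _ (dS x m)) = true)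
      ↔ pvKey x < pvKey m := by
  rw [pvKey_lt_iff]
  simp only [Bool.or_eq_true, Bool.and_eq_true, Bool.not_eq_true', decide_eq_true_eq,
    decide_eq_false_iff_not]
  constructor
  · rintro (h | ⟨h1, h2⟩)
    · exact Or.inl h
    · rcases lt_trichotomy (pvRankA x) (pvRankA m) with h' | h' | h'
      · exact Or.inl h'
      · exact Or.inr ⟨h', h2⟩
      · exact absurd h' h1
  · rintro (h | ⟨h1, h2⟩)
    · exact Or.inl h
    · exact Or.inr ⟨not_lt.mpr (le_of_eq h1), h2⟩

-- ===== A side: sorted2(pool)[0] is the first pvKey-minimum =====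

-- head of insertBy: the inserted element wins iff `lt x (old head)`
theorem head?_insertBy {α : Type} (lt : α → α → Bool) (x : α) (a : List α) :
    (PySem.List.insertBy lt x a).head? =
      match a.head? with
      | none => some x
      | some m => if lt x m then some x else some m := by
  cases a with
  | nil => rfl
  | cons y ys =>
    simp only [PySem.List.insertBy, List.head?_cons]
    by_cases h : lt x y = true <;> simp [h]

-- head of an insertion-built sorted list is the running strict-min fold
theorem head?_foldl_insertBy {α : Type} (lt : α → α → Bool) :
    ∀ (xs : List α) (acc : List α),
      (xs.foldl (fun a x => PySem.List.insertBy lt x a) acc).head? =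
        xs.foldl (fun m x =>
          match m with
          | none => some x
          | some m => if lt x m then some x else some m) acc.head? := by
  intro xs
  induction xs with
  | nil => intro acc; rfl
  | cons x t ih =>
    intro acc
    simp only [List.foldl_cons]
    rw [ih, head?_insertBy]

-- Python: sorted(pool, key=k)[0] = min(pool, key=k)  (stable sort, first extremal element)
theorem head?_sorted2_eq_min2? {α κ₁ κ₂ : Type} [LT κ₁] [DecidableLT κ₁] [LT κ₂] [DecidableLT κ₂]
    (xs : List α) (k1 : α → κ₁) (k2 : α → κ₂) :
    (PySem.List.sorted2 xs k1 k2 false).head? = PySem.List.min2? xs k1 k2 := by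
  unfold PySem.List.sorted2 PySem.List.min2?
  simp only [if_neg (by decide : ¬ (false = true))]
  exact head?_foldl_insertBy _ xs []

theorem pyGet?_zero {α : Type} (l : List α) : PySem.List.pyGet? l 0 = l.head? := by
  cases l <;> simp [PySem.List.pyGet?, PySem.List.pyIdx?]

-- a running strict-min fold (any step of this shape) yields a pvKey-minimal member
theorem min_fold_spec (f : Option String → String → Option String)
    (hf : ∀ (m x : String), f (some m) x = if pvKey x < pvKey m then some x else some m) :
    ∀ (t : List String) (a : String),
      ∃ m, t.foldl f (some a) = some m ∧ m ∈ a :: t ∧ ∀ x ∈ a :: t, pvKey m ≤ pvKey x := by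
  intro t
  induction t with
  | nil =>
    intro a
    refine ⟨a, rfl, List.mem_cons_self, ?_⟩
    intro x hx
    rcases List.mem_cons.mp hx with h | h
    · subst h; exact le_refl _
    · exact absurd h (List.not_mem_nil)
  | cons x t ih =>
    intro a
    rw [List.foldl_cons, hf a x]
    by_cases hc : pvKey x < pvKey a
    · rw [if_pos hc]
      obtain ⟨m, hm, hmem, hmin⟩ := ih x
      refine ⟨m, hm, List.mem_cons_of_mem _ hmem, ?_⟩
      intro y hy
      rcases List.mem_cons.mp hy with h | h
      · subst h
        exact le_trans (hmin x List.mem_cons_self) (le_of_lt hc)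
      · exact hmin y h
    · rw [if_neg hc]
      obtain ⟨m, hm, hmem, hmin⟩ := ih a
      refine ⟨m, hm, ?_, ?_⟩
      · rcases List.mem_cons.mp hmem with h | h
        · rw [h]; exact List.mem_cons_self
        · exact List.mem_cons_of_mem _ (List.mem_cons_of_mem _ h)
      · intro y hy
        rcases List.mem_cons.mp hy with h | h
        · subst h; exact hmin y List.mem_cons_self
        · rcases List.mem_cons.mp h with h2 | h2
          · subst h2
            exact le_trans (hmin a List.mem_cons_self) (le_of_not_gt hc)
          · exact hmin y (List.mem_cons_of_mem _ h2)

theorem min2?_spec (pool : List String) (h : pool ≠ []) :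
    ∃ m, PySem.List.min2? pool pvRankA (fun e => e) = some m
      ∧ m ∈ pool ∧ ∀ x ∈ pool, pvKey m ≤ pvKey x := by
  cases pool with
  | nil => exact absurd rfl h
  | cons p t =>
    unfold PySem.List.min2?
    rw [List.foldl_cons]
    exact min_fold_spec _
      (fun m x => by
        simp only [pvCond_iff]) t p

-- ===== rank facts =====

theorem rank_of_prefix_getElem (e : String) (i : Nat) (hi : i < PREFIX_RANK.length)
    (hp : pvPrefixOf e = PREFIX_RANK[i]) : pvRankA e = (i : Int) := by
  unfold pvRankA
  have hi13 : i < 13 := by simpa [PREFIX_RANK] using hi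
  rw [hp]
  interval_cases i <;>
    simp only [PREFIX_RANK, List.getElem_cons_zero, List.getElem_cons_succ] <;> decide

theorem rank_of_prefix_notMem (e : String) (hp : pvPrefixOf e ∉ PREFIX_RANK) :
    pvRankA e = 999 := by
  unfold pvRankA
  rw [if_neg (by simpa using hp)]

theorem rank_cases (e : String) :
    pvRankA e = 999 ∨ ∃ i : Nat, ∃ hi : i < PREFIX_RANK.length,
      pvPrefixOf e = PREFIX_RANK[i] ∧ pvRankA e = (i : Int) := by
  by_cases h : pvPrefixOf e ∈ PREFIX_RANK
  · obtain ⟨i, hi, hp⟩ := List.getElem_of_mem h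
    exact Or.inr ⟨i, hi, hp.symm, rank_of_prefix_getElem e i hi hp.symm⟩
  · exact Or.inl (rank_of_prefix_notMem e h)

theorem rank_nonneg (e : String) : 0 ≤ pvRankA e := by
  rcases rank_cases e with h | ⟨i, hi, _, h⟩ <;> rw [h] <;> omega

-- ===== B side: the bucket walk yields a pvKey-minimal member =====

theorem bucketPick_spec (n : Nat) :
    ∀ k : Nat, 13 - k = n → k ≤ 13 → ∀ pool : List String, pool ≠ [] →
      (∀ e ∈ pool, ¬ pvRankA e < (k : Int)) →
      ∃ b, pvBucketPick (PREFIX_RANK.drop k) pool = some b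
        ∧ b ∈ pool ∧ ∀ x ∈ pool, pvKey b ≤ pvKey x := by
  induction n with
  | zero =>
    intro k hkn hk pool hne hlow
    have hk13 : k = 13 := by omega
    subst hk13
    have hdrop : PREFIX_RANK.drop 13 = [] := rfl
    rw [hdrop]
    unfold pvBucketPick
    obtain ⟨b, hb⟩ := Option.ne_none_iff_exists'.mp
      (fun h => hne ((PySem.List.min?_eq_none_iff pool (fun e => e)).mp h))
    have hbm := PySem.List.min?_mem hb
    have hbmin := PySem.List.min?_isMin hb
    have hall : ∀ e ∈ pool, pvRankA e = 999 := by
      intro e he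
      rcases rank_cases e with h | ⟨i, hi, _, h⟩
      · exact h
      · have hi13 : i < 13 := by simpa [PREFIX_RANK] using hi
        exfalso; exact hlow e he (by rw [h]; exact_mod_cast hi13)
    refine ⟨b, hb, hbm, ?_⟩
    intro x hx
    rw [pvKey_le_iff, hall b hbm, hall x hx]
    exact Or.inr ⟨rfl, hbmin x hx⟩
  | succ n ih =>
    intro k hkn hk pool hne hlow
    have hklt : k < 13 := by omega
    have hkl : k < PREFIX_RANK.length := by simpa using hklt
    rw [List.drop_eq_getElem_cons hkl]
    unfold pvBucketPick
    by_cases hb : pool.filter (fun e => pvPrefixOf e == PREFIX_RANK[k]) ≠ []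
    · rw [if_pos hb]
      obtain ⟨b, hbe⟩ := Option.ne_none_iff_exists'.mp
        (fun h => hb ((PySem.List.min?_eq_none_iff _ (fun e => e)).mp h))
      have hbm := PySem.List.min?_mem hbe
      have hbmin := PySem.List.min?_isMin hbe
      have hbpool : b ∈ pool := List.mem_of_mem_filter hbm
      have hbpre : pvPrefixOf b = PREFIX_RANK[k] := by
        have := List.of_mem_filter hbm
        simpa using this
      have hbrank : pvRankA b = (k : Int) := rank_of_prefix_getElem b k hkl hbpre
      refine ⟨b, hbe, hbpool, ?_⟩
      intro x hx
      rcases rank_cases x with hx9 | ⟨i, hi, hpre, hri⟩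
      · rw [pvKey_le_iff, hbrank, hx9]; exact Or.inl (by omega)
      · have hik : k ≤ i := by
          have := hlow x hx
          rw [hri] at this
          omega
        rcases Nat.lt_or_ge k i with hlt | hge
        · rw [pvKey_le_iff, hbrank, hri]; exact Or.inl (by omega)
        · have hik' : i = k := by omega
          subst hik'
          have hxb : x ∈ pool.filter (fun e => pvPrefixOf e == PREFIX_RANK[i]) := by
            rw [List.mem_filter]
            exact ⟨hx, by simpa using hpre⟩
          rw [pvKey_le_iff, hbrank, hri]
          exact Or.inr ⟨rfl, hbmin x hxb⟩
    · rw [if_neg hb]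
      have hlow' : ∀ e ∈ pool, ¬ pvRankA e < ((k + 1 : Nat) : Int) := by
        intro e he hcon
        rcases rank_cases e with h9 | ⟨i, hi, hpre, hri⟩
        · rw [h9] at hcon; omega
        · have hik : i = k := by
            have := hlow e he
            rw [hri] at this hcon
            omega
          subst hik
          have : e ∈ pool.filter (fun x => pvPrefixOf x == PREFIX_RANK[i]) := by
            rw [List.mem_filter]
            exact ⟨he, by simpa using hpre⟩
          rw [not_ne_iff.mp hb] at this
          exact absurd this (List.not_mem_nil)
      obtain ⟨b, hbe, hbm, hbmin⟩ := ih (k + 1) (by omega) (by omega) pool hne hlow'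
      exact ⟨b, hbe, hbm, hbmin⟩

theorem bucketPick_full_spec (pool : List String) (h : pool ≠ []) :
    ∃ b, pvBucketPick PREFIX_RANK pool = some b
      ∧ b ∈ pool ∧ ∀ x ∈ pool, pvKey b ≤ pvKey x := by
  have := bucketPick_spec 13 0 rfl (by omega) pool h
    (by intro e _ hc; exact absurd hc (not_lt.mpr (rank_nonneg e)))
  simpa using this

-- two pvKey-minimal members coincide (the key's second component is the element)
theorem key_min_unique {pool : List String} {m b : String}
    (hm : m ∈ pool) (hb : b ∈ pool)
    (hmmin : ∀ x ∈ pool, pvKey m ≤ pvKey x) (hbmin : ∀ x ∈ pool, pvKey b ≤ pvKey x) :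
    m = b := by
  have h1 : pvKey m = pvKey b := le_antisymm (hmmin b hb) (hbmin m hm)
  unfold pvKey at h1
  have := congrArg (fun p => (ofLex p).2) h1
  simpa using this

-- the two core selections agree on any nonempty pool
theorem selections_agree (pool : List String) (h : pool ≠ []) :
    PySem.List.pyGet? (PySem.List.sorted2 pool pvRankA (fun e => e) false) 0
      = pvBucketPick PREFIX_RANK pool := by
  rw [pyGet?_zero, head?_sorted2_eq_min2?]
  obtain ⟨m, hme, hmm, hmmin⟩ := min2?_spec pool h
  obtain ⟨b, hbe, hbm, hbmin⟩ := bucketPick_full_spec pool h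
  rw [hme, hbe, key_min_unique hmm hbm hmmin hbmin]

-- ===== VERDICT (by name: the statement is the Claim_ definition above) =====
theorem pick_best_email_spec : Claim_equal_pick_best_email := by
  intro emails expected_domain _
  unfold Spec_pick_best_email pick_best_email pick_best_email_alt
  simp only [ne_eq]
  by_cases hdm : emails.filter (fun e =>
      PySem.Str.endswith e ("@" ++ expected_domain) || PySem.Str.endswith e ("." ++ expected_domain)) = []
  · rw [if_neg (not_not_intro hdm), if_pos hdm]
    by_cases he : emails = []
    · rw [if_pos he, if_pos he]
    · rw [if_neg he, if_neg he]
      exact selections_agree emails he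
  · rw [if_pos hdm, if_neg hdm, if_neg hdm, if_neg hdm]
    exact selections_agree _ hdm
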